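-- pv_equiv track=rewrite | github.com/relevreal/bug | bug-engine/src/bug_engine/.ipynb_checkpoints/bug_engine-checkpoint.py | make_row_idxs
-- ===== SOURCE A (Python) =====
-- from collections.abc import Iterable, Generator
--
-- def make_row_idxs(board_size: int) -> Generator[int]:
--     row_idx = board_size - 1
--     longest_row = 2 * board_size - 1
--     increasing = range(board_size + 1, longest_row)
--     decreasing = reversed(increasing)
--     yield row_idx
--     for inc in  increasing:
--         row_idx += inc
--         yield row_idx
--     row_idx += longest_row
--     yield row_idx
--     for dec in decreasing:
--         row_idx += dec
--         yield row_idx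
-- ===== SOURCE B (Python) =====
-- def make_row_idxs(board_size):
--     # closed-form row start indices: two index loops with direct formulas,
--     # no running accumulator
--     b = board_size
--     m = max(0, b - 2)
--
--     def up(i):
--         # start index of row i in the widening half
--         return (b - 1) + i * (b + 1) + i * (i - 1) // 2
--
--     peak = up(m) + (2 * b - 1)
--     for i in range(m + 1):
--         yield up(i)
--     for j in range(m + 1):
--         yield peak + j * (2 * b - 2) - j * (j - 1) // 2
-- ===== Notes on version B (the rewrite author's own statement) =====
-- stated objective: alternative
-- what changed: B replaces A's stateful cumulative-sum generator (running row_idx updated across two ramp loops) with closed-form arithmetic: each row start index is computed directly from its index via a quadratic formula, with no running accumulator.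
import Mathlib
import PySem

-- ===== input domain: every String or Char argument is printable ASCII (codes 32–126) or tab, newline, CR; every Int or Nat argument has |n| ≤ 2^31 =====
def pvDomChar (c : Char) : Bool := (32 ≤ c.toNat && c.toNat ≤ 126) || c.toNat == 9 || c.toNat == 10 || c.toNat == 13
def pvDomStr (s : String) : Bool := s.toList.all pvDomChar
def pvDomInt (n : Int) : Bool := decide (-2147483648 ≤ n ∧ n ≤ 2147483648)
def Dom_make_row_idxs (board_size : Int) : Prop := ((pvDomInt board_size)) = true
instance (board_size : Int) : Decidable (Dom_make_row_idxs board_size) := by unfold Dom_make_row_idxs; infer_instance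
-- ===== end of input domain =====

-- B computes each row start index by a closed-form quadratic formula instead of A's
-- running accumulator over two ramp loops (objective: alternative; same O(n) cost).

-- ===== PORT A =====
-- literal port of A: generator → list of yielded values; each 'for' loop folds
-- over the same (row_idx, yielded-so-far) state.
def make_row_idxs (board_size : Int) : List Int :=
  let row_idx := board_size - 1
  let longest_row := 2 * board_size - 1
  let increasing := PySem.List.pyRange (board_size + 1) longest_row 1
  let decreasing := increasing.reverse
  let out := [row_idx]
  let st := increasing.foldl
    (fun (st : Int × List Int) inc => (st.1 + inc, st.2 ++ [st.1 + inc])) (row_idx, out)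
  let row_idx := st.1 + longest_row
  let out := st.2 ++ [row_idx]
  let st2 := decreasing.foldl
    (fun (st : Int × List Int) dec => (st.1 + dec, st.2 ++ [st.1 + dec])) (row_idx, out)
  st2.2

-- ===== PORT B =====
-- literal port of Source B: the two yield loops become maps over the same ranges.
def make_row_idxs_alt (board_size : Int) : List Int :=
  let b := board_size
  let m : Int := max 0 (b - 2)
  let up := fun (i : Int) => (b - 1) + i * (b + 1) + PySem.Int.floordiv (i * (i - 1)) 2
  let peak := up m + (2 * b - 1)
  (PySem.List.pyRange 0 (m + 1) 1).map up ++
    (PySem.List.pyRange 0 (m + 1) 1).map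
      (fun j => peak + j * (2 * b - 2) - PySem.Int.floordiv (j * (j - 1)) 2)

-- ===== PRECONDITION & SPEC =====
def Spec_make_row_idxs (board_size : Int) (out : List Int) : Prop := out = make_row_idxs_alt board_size
instance (board_size : Int) (out : List Int) : Decidable (Spec_make_row_idxs board_size out) := by unfold Spec_make_row_idxs; infer_instance

-- ===== CLAIM (what is proved, stated in full; the proofs are below) =====
def Claim_equal_make_row_idxs : Prop := ∀ (board_size : Int), Dom_make_row_idxs board_size → Spec_make_row_idxs board_size (make_row_idxs board_size)

-- ===== LEMMAS AND PROOFS =====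

-- the yielded prefix sums of a list of increments, starting from r
def accList (r : Int) : List Int → List Int
  | [] => []
  | x :: xs => (r + x) :: accList (r + x) xs

-- triangular number as Int: tri k = 0 + 1 + ... + (k-1)
def tri (k : Nat) : Int := ((List.range k).map (fun i => (i : Int))).sum

lemma tri_succ (k : Nat) : tri (k + 1) = tri k + k := by
  simp [tri, List.range_succ]

lemma two_tri (k : Nat) : 2 * tri k = (k : Int) * ((k : Int) - 1) := by
  induction k with
  | zero => simp [tri]
  | succ n ih => rw [tri_succ]; push_cast; ring_nf; ring_nf at ih; omega

lemma floordiv_tri (k : Nat) :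
    PySem.Int.floordiv ((k : Int) * ((k : Int) - 1)) 2 = tri k := by
  rw [← two_tri, PySem.Int.floordiv_eq_ediv_of_pos (by norm_num)]
  omega

lemma accList_append (r : Int) (xs : List Int) (x : Int) :
    accList r (xs ++ [x]) = accList r xs ++ [r + xs.sum + x] := by
  induction xs generalizing r with
  | nil => simp [accList]
  | cons y ys ih => simp [accList, ih, add_assoc]

lemma foldl_acc (xs : List Int) (r : Int) (out : List Int) :
    xs.foldl (fun (st : Int × List Int) x => (st.1 + x, st.2 ++ [st.1 + x])) (r, out)
      = (r + xs.sum, out ++ accList r xs) := by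
  induction xs generalizing r out with
  | nil => simp [accList]
  | cons y ys ih => simp [accList, ih, add_assoc]

lemma sum_ramp_up (c : Int) (n : Nat) :
    (((List.range n).map (fun (k : Nat) => c + (k : Int))).sum) = n * c + tri n := by
  induction n with
  | zero => simp [tri]
  | succ m ih => rw [List.range_succ]; simp [ih, tri_succ]; ring

lemma sum_ramp_down (d : Int) (n : Nat) :
    (((List.range n).map (fun (k : Nat) => d - (k : Int))).sum) = n * d - tri n := by
  induction n with
  | zero => simp [tri]
  | succ m ih =>
      rw [List.range_succ, List.map_append, List.sum_append, ih]
      simp [tri_succ]; ring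

lemma acc_ramp_up (r c : Int) (n : Nat) :
    r :: accList r ((List.range n).map (fun (k : Nat) => c + (k : Int)))
      = (List.range (n + 1)).map (fun (i : Nat) => r + (i : Int) * c + tri i) := by
  induction n with
  | zero => simp [accList, tri]
  | succ m ih =>
      rw [List.range_succ (n := m + 1)]
      rw [show (List.range (m+1)).map (fun (k : Nat) => c + (k : Int))
            = (List.range m).map (fun (k : Nat) => c + (k : Int)) ++ [c + (m : Int)] by
          rw [List.range_succ]; simp]
      rw [accList_append, List.map_append, ← List.cons_append, ih]
      congr 1
      simp only [List.map_cons, List.map_nil, List.cons.injEq, and_true]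
      rw [sum_ramp_up, tri_succ]
      push_cast; ring

lemma acc_ramp_down (r d : Int) (n : Nat) :
    r :: accList r ((List.range n).map (fun (k : Nat) => d - (k : Int)))
      = (List.range (n + 1)).map (fun (j : Nat) => r + (j : Int) * d - tri j) := by
  induction n with
  | zero => simp [accList, tri]
  | succ m ih =>
      rw [List.range_succ (n := m + 1)]
      rw [show (List.range (m+1)).map (fun (k : Nat) => d - (k : Int))
            = (List.range m).map (fun (k : Nat) => d - (k : Int)) ++ [d - (m : Int)] by
          rw [List.range_succ]; simp]
      rw [accList_append, List.map_append, ← List.cons_append, ih]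
      congr 1
      simp only [List.map_cons, List.map_nil, List.cons.injEq, and_true]
      rw [sum_ramp_down, tri_succ]
      push_cast; ring

lemma reverse_ramp (c : Int) (n : Nat) :
    ((List.range n).map (fun (k : Nat) => c + (k : Int))).reverse
      = (List.range n).map (fun (k : Nat) => (c + (n : Int) - 1) - (k : Int)) := by
  induction n generalizing c with
  | zero => simp
  | succ m ih =>
      rw [show (List.range (m+1)).map (fun (k : Nat) => c + (k : Int))
            = (List.range m).map (fun (k : Nat) => c + (k : Int)) ++ [c + (m : Int)] by
          rw [List.range_succ]; simp]
      rw [List.reverse_append, List.range_succ_eq_map]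
      simp only [List.reverse_singleton, List.map_cons, List.map_map, List.singleton_append]
      rw [ih c]
      congr 1
      · push_cast; ring
      · apply List.map_congr_left; intro k _; simp [Function.comp]; ring

theorem make_row_idxs_eq_alt (b : Int) : make_row_idxs b = make_row_idxs_alt b := by
  rcases le_or_gt b 2 with hb | hb
  · -- small boards: both ramps empty, two rows each
    have h1 : PySem.List.pyRange (b + 1) (2 * b - 1) 1 = [] :=
      PySem.List.pyRange_one_eq_nil (by omega)
    have hm : max 0 (b - 2) = 0 := by omega
    simp only [make_row_idxs, make_row_idxs_alt, h1, hm, List.reverse_nil, List.foldl_nil]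
    rw [show (0 : Int) + 1 = 1 by ring, PySem.List.pyRange_one]
    norm_num [PySem.Int.floordiv, List.range_succ]
  · -- b ≥ 3: ramps have n = (b-2).toNat ≥ 1 steps
    set n : Nat := (b - 2).toNat with hn
    have hbn : (n : Int) = b - 2 := by omega
    have hcast : (2 * b - 1 - (b + 1)).toNat = n := by omega
    have hmax : max 0 (b - 2) = (n : Int) := by omega
    have htop : ((n : Int) + 1 - 0).toNat = n + 1 := by omega
    have hinc : PySem.List.pyRange (b + 1) (2 * b - 1) 1
        = (List.range n).map (fun (k : Nat) => (b + 1) + (k : Int)) := by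
      rw [PySem.List.pyRange_one, hcast]
    have hdec : ((List.range n).map (fun (k : Nat) => (b + 1) + (k : Int))).reverse
        = (List.range n).map (fun (k : Nat) => (2 * b - 2) - (k : Int)) := by
      rw [reverse_ramp]
      apply List.map_congr_left; intro k _; omega
    have hrng : PySem.List.pyRange 0 ((n : Int) + 1) 1
        = (List.range (n + 1)).map (fun (k : Nat) => (k : Int)) := by
      rw [PySem.List.pyRange_one, htop]; simp
    simp only [make_row_idxs, make_row_idxs_alt, hinc, hdec, hmax, hrng, foldl_acc]
    rw [List.map_map, List.map_map]
    have hup : (b - 1) :: accList (b - 1) ((List.range n).map (fun (k : Nat) => (b + 1) + (k : Int)))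
        = (List.range (n + 1)).map (fun (i : Nat) => (b - 1) + (i : Int) * (b + 1) + tri i) :=
      acc_ramp_up (b - 1) (b + 1) n
    have hpeak : (b - 1) + ((List.range n).map (fun (k : Nat) => (b + 1) + (k : Int))).sum + (2 * b - 1)
        = (b - 1) + (n : Int) * (b + 1) + tri n + (2 * b - 1) := by
      rw [sum_ramp_up]; ring
    simp only [List.cons_append, List.nil_append, List.append_assoc]
    rw [show ∀ (p : Int) (xs ys : List Int), (b - 1) :: (xs ++ (p :: ys)) = ((b-1) :: xs) ++ (p :: ys) by
      intro p xs ys; simp]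
    rw [hup, hpeak, acc_ramp_down ((b - 1) + (n : Int) * (b + 1) + tri n + (2 * b - 1)) (2 * b - 2) n]
    congr 1
    · apply List.map_congr_left; intro i _
      simp only [Function.comp]
      have h2 := floordiv_tri i
      push_cast at h2 ⊢
      rw [h2]
    · apply List.map_congr_left; intro j _
      simp only [Function.comp]
      have h1 := floordiv_tri n
      have h2 := floordiv_tri j
      push_cast at h1 h2 ⊢
      rw [h1, h2]

-- ===== VERDICT (by name: the statement is the Claim_ definition above) =====
theorem make_row_idxs_spec : Claim_equal_make_row_idxs := by
  intro b _
  unfold Spec_make_row_idxs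
  exact make_row_idxs_eq_alt b
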